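-- pv_equiv track=rewrite | github.com/chitturics/obs-ai | shared/utils.py | split_pipeline
-- ===== SOURCE A (Python) =====
-- from typing import List, Optional, Tuple
--
-- def split_pipeline(query: str) -> List[str]:
--     """
--     Split an SPL query into pipeline stages on unquoted, unbracketed pipes.
--
--     Correctly handles:
--     - Quoted strings (single, double, backtick)
--     - Subsearch brackets  [search ...]
--     - Escaped quotes
--
--     Returns a list of stage strings (without the leading pipe character).
--     """
--     stages: list[str] = []
--     current: list[str] = []
--     in_quote = False
--     quote_char: Optional[str] = None
--     depth = 0
--
--     for i, char in enumerate(query):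
--         # Track quotes (skip escaped quotes)
--         if char in '"\'`' and (i == 0 or query[i - 1] != '\\'):
--             if not in_quote:
--                 in_quote = True
--                 quote_char = char
--             elif char == quote_char:
--                 in_quote = False
--                 quote_char = None
--
--         if not in_quote:
--             if char == '[':
--                 depth += 1
--             elif char == ']':
--                 depth = max(0, depth - 1)
--             elif char == '|' and depth == 0:
--                 stage = ''.join(current).strip()
--                 if stage:
--                     stages.append(stage)
--                 current = []
--                 continue
--
--         current.append(char)
--
--     stage = ''.join(current).strip()
--     if stage:
--         stages.append(stage)
--
--     return stages
-- ===== SOURCE B (Python) =====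
-- def split_pipeline(query: str) -> list:
--     """Split an SPL query into pipeline stages on unquoted, unbracketed pipes.
--
--     Explicit-index re-implementation: quoted spans are consumed whole by an
--     inner scan, so no in_quote/quote_char state is carried in the main loop.
--     """
--     stages = []
--     current = []
--     depth = 0
--     i = 0
--     n = len(query)
--     while i < n:
--         ch = query[i]
--         if ch in '"\'`' and (i == 0 or query[i - 1] != '\\'):
--             # consume the whole quoted span (closing quote included), or the
--             # rest of the string if the quote is never closed
--             j = i + 1
--             while j < n and not (query[j] == ch and query[j - 1] != '\\'):
--                 j += 1
--             end = j + 1 if j < n else n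
--             current.append(query[i:end])
--             i = end
--             continue
--         if ch == '[':
--             depth += 1
--         elif ch == ']':
--             depth = max(0, depth - 1)
--         elif ch == '|' and depth == 0:
--             stage = ''.join(current).strip()
--             if stage:
--                 stages.append(stage)
--             current = []
--             i += 1
--             continue
--         current.append(ch)
--         i += 1
--     stage = ''.join(current).strip()
--     if stage:
--         stages.append(stage)
--     return stages
-- ===== Notes on version B (the rewrite author's own statement) =====
-- stated objective: alternative
-- what changed: Replaces the per-character state machine carrying in_quote/quote_char flags by an explicit-index while loop whose inner scan consumes each quoted span whole, so the main loop carries no quote state at all.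
import Mathlib
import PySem

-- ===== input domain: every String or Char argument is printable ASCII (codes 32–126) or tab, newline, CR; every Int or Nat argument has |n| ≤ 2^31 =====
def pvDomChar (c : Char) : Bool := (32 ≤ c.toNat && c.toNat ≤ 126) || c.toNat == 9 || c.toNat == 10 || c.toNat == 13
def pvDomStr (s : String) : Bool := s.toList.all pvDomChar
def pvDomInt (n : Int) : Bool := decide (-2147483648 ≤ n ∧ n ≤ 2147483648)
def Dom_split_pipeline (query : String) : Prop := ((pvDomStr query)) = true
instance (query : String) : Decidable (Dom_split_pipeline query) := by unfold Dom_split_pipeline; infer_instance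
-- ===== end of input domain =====

-- B replaces A's per-character in_quote/quote_char state machine by an explicit-index loop
-- whose inner scan consumes each quoted span whole (objective: alternative decomposition).


-- ===== PORT A =====
-- state: (stages, current, in_quote, quote_char, depth)
-- `query[i-1]` is read with getD at (i-1).toNat: the branch is guarded by i ≠ 0, so i-1 ≥ 0 (exact).
def aStep (cs : List Char) (st : List String × List Char × Bool × Option Char × Int)
    (ic : Int × Char) : List String × List Char × Bool × Option Char × Int :=
  let (stages, current, inq0, qc0, depth) := st
  let (i, c) := ic
  let (inq, qc) :=
    if (c = '"' ∨ c = '\'' ∨ c = '`') ∧ (i = 0 ∨ cs.getD (i - 1).toNat ' ' ≠ '\\') then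
      if ¬ inq0 then (true, some c)
      else if some c = qc0 then (false, (none : Option Char))
      else (inq0, qc0)
    else (inq0, qc0)
  if ¬ inq then
    if c = '[' then (stages, current ++ [c], inq, qc, depth + 1)
    else if c = ']' then (stages, current ++ [c], inq, qc, max 0 (depth - 1))
    else if c = '|' ∧ depth = 0 then
      let stage := PySem.Str.strip (String.ofList current)
      (if stage ≠ "" then stages ++ [stage] else stages, [], inq, qc, depth)
    else (stages, current ++ [c], inq, qc, depth)
  else (stages, current ++ [c], inq, qc, depth)

def aFinish (st : List String × List Char × Bool × Option Char × Int) : List String :=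
  let (stages, current, _, _, _) := st
  let stage := PySem.Str.strip (String.ofList current)
  if stage ≠ "" then stages ++ [stage] else stages

def split_pipeline (query : String) : List String :=
  let cs := query.toList
  aFinish ((PySem.List.enumerate cs).foldl (aStep cs) ([], [], false, none, 0))

-- ===== PORT B =====
-- inner scan: first j ≥ start with cs[j] = q and cs[j-1] ≠ '\', +1 (end of quoted span, exclusive);
-- cs.length if the quote is never closed
def scanQ (cs : List Char) (q : Char) (j : Nat) : Nat :=
  if j < cs.length then
    if cs.getD j ' ' = q ∧ cs.getD (j - 1) ' ' ≠ '\\' then j + 1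
    else scanQ cs q (j + 1)
  else cs.length
termination_by cs.length - j

theorem scanQ_ge (cs : List Char) (q : Char) (j : Nat) (hj : j ≤ cs.length) :
    j ≤ scanQ cs q j := by
  unfold scanQ
  split
  · split
    · omega
    · have := scanQ_ge cs q (j + 1) (by omega); omega
  · omega
termination_by cs.length - j

def goB (cs : List Char) (i : Nat) (stages : List String) (current : List Char)
    (depth : Int) : List String :=
  if _h : i < cs.length then
    let c := cs.getD i ' '
    if (c = '"' ∨ c = '\'' ∨ c = '`') ∧ (i = 0 ∨ cs.getD (i - 1) ' ' ≠ '\\') then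
      let e := scanQ cs c (i + 1)
      goB cs e stages (current ++ (cs.drop i).take (e - i)) depth
    else if c = '[' then goB cs (i + 1) stages (current ++ [c]) (depth + 1)
    else if c = ']' then goB cs (i + 1) stages (current ++ [c]) (max 0 (depth - 1))
    else if c = '|' ∧ depth = 0 then
      let stage := PySem.Str.strip (String.ofList current)
      goB cs (i + 1) (if stage ≠ "" then stages ++ [stage] else stages) [] depth
    else goB cs (i + 1) stages (current ++ [c]) depth
  else
    let stage := PySem.Str.strip (String.ofList current)
    if stage ≠ "" then stages ++ [stage] else stages
termination_by cs.length - i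
decreasing_by
  · have := scanQ_ge cs (cs.getD i ' ') (i + 1) (by omega); omega
  all_goals omega

def split_pipeline_alt (query : String) : List String :=
  goB query.toList 0 [] [] 0

-- ===== PRECONDITION & SPEC =====
def Spec_split_pipeline (query : String) (out : List String) : Prop := out = split_pipeline_alt query
instance (query : String) (out : List String) : Decidable (Spec_split_pipeline query out) := by unfold Spec_split_pipeline; infer_instance

-- ===== CLAIM (what is proved, stated in full; the proofs are below) =====
def Claim_equal_split_pipeline : Prop := ∀ (query : String), Dom_split_pipeline query → Spec_split_pipeline query (split_pipeline query)

-- ===== LEMMAS AND PROOFS =====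

-- A's fold restarted at index i (states after processing the first i characters)
def aRun (cs : List Char) (i : Nat) (st : List String × List Char × Bool × Option Char × Int) :
    List String × List Char × Bool × Option Char × Int :=
  ((PySem.List.enumerate cs).drop i).foldl (aStep cs) st

theorem aRun_stop (cs : List Char) (i : Nat) (st : List String × List Char × Bool × Option Char × Int)
    (h : cs.length ≤ i) : aRun cs i st = st := by
  unfold aRun
  rw [List.drop_eq_nil_of_le (by simpa [PySem.List.length_enumerate] using h)]
  rfl

theorem aRun_step (cs : List Char) (i : Nat) (st : List String × List Char × Bool × Option Char × Int)
    (h : i < cs.length) :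
    aRun cs i st = aRun cs (i + 1) (aStep cs st ((i : Int), cs.getD i ' ')) := by
  unfold aRun
  have hl : i < (PySem.List.enumerate cs).length := by
    simpa [PySem.List.length_enumerate] using h
  rw [List.drop_eq_getElem_cons hl, List.foldl_cons]
  congr 1
  rw [PySem.List.getElem_enumerate]
  simp [List.getD_eq_getElem?_getD, List.getElem?_eq_getElem h]

-- processing a quoted span: from a state in quote q at index 1 ≤ j, A appends characters
-- verbatim up to (and including) the closing quote, leaving the quote at index scanQ cs q j
-- drop/take cons identity used when peeling one character off a span
theorem span_cons (cs : List Char) (j e : Nat) (hj : j < cs.length) (he : j + 1 ≤ e) :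
    (cs.drop j).take (e - j) = cs.getD j ' ' :: (cs.drop (j + 1)).take (e - (j + 1)) := by
  rw [List.drop_eq_getElem_cons hj]
  have : e - j = (e - (j + 1)) + 1 := by omega
  rw [this, List.take_succ_cons]
  simp [List.getD_eq_getElem?_getD, List.getElem?_eq_getElem hj]

theorem quote_phase (cs : List Char) (q : Char) (hq : q = '"' ∨ q = '\'' ∨ q = '`')
    (j : Nat) (hj : 1 ≤ j)
    (stages : List String) (current : List Char) (depth : Int) :
    aFinish (aRun cs j (stages, current, true, some q, depth)) =
    aFinish (aRun cs (scanQ cs q j)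
      (stages, current ++ (cs.drop j).take (scanQ cs q j - j), false, none, depth)) := by
  have hcast : ((j : Int) - 1).toNat = j - 1 := by omega
  by_cases hl : j < cs.length
  · rw [aRun_step cs j _ hl]
    by_cases hcl : cs.getD j ' ' = q ∧ cs.getD (j - 1) ' ' ≠ '\\'
    · -- closing quote at j
      have he : scanQ cs q j = j + 1 := by rw [scanQ, if_pos hl, if_pos hcl]
      have hne : q ≠ '[' ∧ q ≠ ']' ∧ q ≠ '|' := by
        rcases hq with h | h | h <;> subst h <;> exact ⟨by decide, by decide, by decide⟩
      have hcond : (cs.getD j ' ' = '"' ∨ cs.getD j ' ' = '\'' ∨ cs.getD j ' ' = '`')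
          ∧ ((j : Int) = 0 ∨ cs.getD ((j : Int) - 1).toNat ' ' ≠ '\\') := by
        exact ⟨by rw [hcl.1]; exact hq, Or.inr (by rw [hcast]; exact hcl.2)⟩
      have hstep : aStep cs (stages, current, true, some q, depth) ((j : Int), cs.getD j ' ')
          = (stages, current ++ [q], false, none, depth) := by
        simp only [aStep]
        rw [if_pos hcond]
        simp only [hcl.1]
        simp [hne.1, hne.2.1, hne.2.2]
      rw [hstep, he]
      have : (cs.drop j).take (j + 1 - j) = [q] := by
        rw [span_cons cs j (j + 1) hl (by omega)]
        simp [-List.getD_eq_getElem?_getD, hcl.1]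
      rw [this]
    · -- not the closing quote: the character is appended, quote state unchanged
      have he : scanQ cs q j = scanQ cs q (j + 1) := by rw [scanQ, if_pos hl, if_neg hcl]
      have hstep : aStep cs (stages, current, true, some q, depth) ((j : Int), cs.getD j ' ')
          = (stages, current ++ [cs.getD j ' '], true, some q, depth) := by
        simp only [aStep]
        by_cases hev : (cs.getD j ' ' = '"' ∨ cs.getD j ' ' = '\'' ∨ cs.getD j ' ' = '`')
            ∧ ((j : Int) = 0 ∨ cs.getD ((j : Int) - 1).toNat ' ' ≠ '\\')
        · rw [if_pos hev]
          have hne : cs.getD j ' ' ≠ q := by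
            intro hcq
            rcases hev.2 with h0 | hp
            · omega
            · exact hcl ⟨hcq, by rwa [hcast] at hp⟩
          simp [-List.getD_eq_getElem?_getD, hne]
        · rw [if_neg hev]
          simp
      rw [hstep, he]
      have hge : j + 1 ≤ scanQ cs q (j + 1) := scanQ_ge cs q (j + 1) (by omega)
      rw [quote_phase cs q hq (j + 1) (by omega) stages (current ++ [cs.getD j ' ']) depth]
      rw [span_cons cs j (scanQ cs q (j + 1)) hl hge]
      simp
  · -- past the end: both runs are over, and aFinish ignores the quote state
    have he : scanQ cs q j = cs.length := by rw [scanQ, if_neg hl]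
    rw [aRun_stop cs j _ (by omega), he, aRun_stop cs cs.length _ (by omega)]
    have h0 : (cs.drop j).take (cs.length - j) = [] := by
      rw [List.drop_eq_nil_of_le (by omega)]; simp
    rw [h0]
    simp [aFinish]
termination_by cs.length - j
decreasing_by omega

theorem main_phase (cs : List Char) (i : Nat) (stages : List String) (current : List Char)
    (depth : Int) :
    aFinish (aRun cs i (stages, current, false, none, depth)) = goB cs i stages current depth := by
  have hcast : ((i : Int) - 1).toNat = i - 1 := by omega
  rw [goB]
  by_cases hl : i < cs.length
  · rw [dif_pos hl, aRun_step cs i _ hl]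
    by_cases hqc : (cs.getD i ' ' = '"' ∨ cs.getD i ' ' = '\'' ∨ cs.getD i ' ' = '`')
        ∧ (i = 0 ∨ cs.getD (i - 1) ' ' ≠ '\\')
    · -- a quote opens at i: A enters quote state, B consumes the span via scanQ
      have hcond : (cs.getD i ' ' = '"' ∨ cs.getD i ' ' = '\'' ∨ cs.getD i ' ' = '`')
          ∧ ((i : Int) = 0 ∨ cs.getD ((i : Int) - 1).toNat ' ' ≠ '\\') := by
        refine ⟨hqc.1, ?_⟩
        rcases hqc.2 with h0 | hp
        · exact Or.inl (by omega)
        · exact Or.inr (by rwa [hcast])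
      have hstep : aStep cs (stages, current, false, none, depth) ((i : Int), cs.getD i ' ')
          = (stages, current ++ [cs.getD i ' '], true, some (cs.getD i ' '), depth) := by
        simp only [aStep]
        rw [if_pos hcond]
        simp
      rw [hstep, if_pos hqc]
      have hge : i + 1 ≤ scanQ cs (cs.getD i ' ') (i + 1) :=
        scanQ_ge cs (cs.getD i ' ') (i + 1) (by omega)
      rw [quote_phase cs (cs.getD i ' ') hqc.1 (i + 1) (by omega)]
      rw [main_phase cs (scanQ cs (cs.getD i ' ') (i + 1))]
      show _ = goB cs (scanQ cs (cs.getD i ' ') (i + 1)) stages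
        (current ++ (cs.drop i).take (scanQ cs (cs.getD i ' ') (i + 1) - i)) depth
      rw [span_cons cs i (scanQ cs (cs.getD i ' ') (i + 1)) hl hge]
      simp
    · -- no quote opens: both sides treat the character the same way
      have hev : ¬((cs.getD i ' ' = '"' ∨ cs.getD i ' ' = '\'' ∨ cs.getD i ' ' = '`')
          ∧ ((i : Int) = 0 ∨ cs.getD ((i : Int) - 1).toNat ' ' ≠ '\\')) := by
        intro h
        refine hqc ⟨h.1, ?_⟩
        rcases h.2 with h0 | hp
        · exact Or.inl (by omega)
        · exact Or.inr (by rwa [hcast] at hp)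
      rw [if_neg hqc]
      by_cases hb1 : cs.getD i ' ' = '['
      · have hstep : aStep cs (stages, current, false, none, depth) ((i : Int), cs.getD i ' ')
            = (stages, current ++ [cs.getD i ' '], false, none, depth + 1) := by
          simp only [aStep]
          rw [if_neg hev]
          simp [-List.getD_eq_getElem?_getD, hb1]
        rw [hstep, if_pos hb1, main_phase cs (i + 1)]
      · by_cases hb2 : cs.getD i ' ' = ']'
        · have hstep : aStep cs (stages, current, false, none, depth) ((i : Int), cs.getD i ' ')
              = (stages, current ++ [cs.getD i ' '], false, none, max 0 (depth - 1)) := by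
            simp only [aStep]
            rw [if_neg hev]
            simp [-List.getD_eq_getElem?_getD, hb2]
          rw [hstep, if_neg hb1, if_pos hb2, main_phase cs (i + 1)]
        · by_cases hb3 : cs.getD i ' ' = '|' ∧ depth = 0
          · have hstep : aStep cs (stages, current, false, none, depth) ((i : Int), cs.getD i ' ')
                = (if PySem.Str.strip (String.ofList current) ≠ "" then
                     stages ++ [PySem.Str.strip (String.ofList current)] else stages,
                   [], false, none, depth) := by
              simp only [aStep]
              rw [if_neg hev]
              simp [-List.getD_eq_getElem?_getD, hb3.1, hb3.2]
            rw [hstep, if_neg hb1, if_neg hb2, if_pos hb3, main_phase cs (i + 1)]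
          · have hstep : aStep cs (stages, current, false, none, depth) ((i : Int), cs.getD i ' ')
                = (stages, current ++ [cs.getD i ' '], false, none, depth) := by
              simp only [aStep]
              rw [if_neg hev]
              simp [-List.getD_eq_getElem?_getD, hb1, hb2, hb3]
            rw [hstep, if_neg hb1, if_neg hb2, if_neg hb3, main_phase cs (i + 1)]
  · rw [dif_neg hl, aRun_stop cs i _ (by omega)]
    simp [aFinish]
termination_by cs.length - i
decreasing_by
  · have := scanQ_ge cs (cs.getD i ' ') (i + 1) (by omega); omega
  all_goals omega

-- ===== VERDICT (by name: the statement is the Claim_ definition above) =====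
theorem split_pipeline_spec : Claim_equal_split_pipeline := by
  intro query _
  unfold Spec_split_pipeline split_pipeline split_pipeline_alt
  simpa [aRun] using main_phase query.toList 0 [] [] 0
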